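-- pv_equiv track=rewrite | github.com/dratcliff/advent-of-code | aoc/3/a.py | oxy
-- ===== SOURCE A (Python) =====
-- def oxy(all, pos, cur):
--     one = 0
--     zero = 0
--     for a in all:
--         if a[pos] == '1':
--             one += 1
--         else:
--             zero += 1
--     if one >= zero:
--         cur[pos] = '1'
--     else:
--         cur[pos] = '0'
--
--     n = []
--     for a in all:
--         if a[pos] == cur[pos]:
--             n.append(a)
--     return n
-- ===== SOURCE B (Python) =====
-- def oxy(all, pos, cur):
--     ones = []
--     zeros = []
--     for a in all:
--         c = a[pos]
--         if c == '1':
--             ones.append(a)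
--         elif c == '0':
--             zeros.append(a)
--     if 2 * len(ones) >= len(all):
--         cur[pos] = '1'
--         return ones
--     cur[pos] = '0'
--     return zeros
-- ===== Notes on version B (the rewrite author's own statement) =====
-- stated objective: alternative
-- what changed: One partitioning pass that builds the ones/zeros result lists directly and selects one at the end, instead of A's count pass, cur mutation, and a second re-filter pass over all.
import Mathlib
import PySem

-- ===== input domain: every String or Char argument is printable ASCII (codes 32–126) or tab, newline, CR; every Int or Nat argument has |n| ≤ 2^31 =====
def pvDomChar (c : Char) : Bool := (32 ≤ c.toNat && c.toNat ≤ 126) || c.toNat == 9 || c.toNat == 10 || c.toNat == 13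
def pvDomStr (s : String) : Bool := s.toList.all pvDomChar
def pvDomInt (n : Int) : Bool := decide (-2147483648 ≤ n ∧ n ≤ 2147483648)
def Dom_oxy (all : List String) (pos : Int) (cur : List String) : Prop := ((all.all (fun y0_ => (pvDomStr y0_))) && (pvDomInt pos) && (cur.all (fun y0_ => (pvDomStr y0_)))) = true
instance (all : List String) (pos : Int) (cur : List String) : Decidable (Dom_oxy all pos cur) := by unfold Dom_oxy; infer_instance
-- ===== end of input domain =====

-- B replaces A's count-then-refilter (two passes plus a cur mutation read back) by one
-- partitioning pass that builds both candidate result lists and selects one at the end.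
-- Python A mutates cur[pos] in place; Python B performs the same mutation; the equivalence
-- proved here is about the return value.

-- ===== PORT A =====
def oxy (all : List String) (pos : Int) (cur : List String) : List String :=
  let oz : Int × Int := all.foldl (fun oz a =>
      if PySem.List.pyGetD a.toList pos ' ' = '1' then (oz.1 + 1, oz.2) else (oz.1, oz.2 + 1))
    (0, 0)
  let cur' := PySem.List.pySetD cur pos (if oz.1 ≥ oz.2 then "1" else "0")
  all.foldl (fun n a =>
      if String.ofList [PySem.List.pyGetD a.toList pos ' '] = PySem.List.pyGetD cur' pos "" then
        n ++ [a]
      else n)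
    []

-- ===== PORT B =====
def oxy_alt (all : List String) (pos : Int) (cur : List String) : List String :=
  let p : List String × List String := all.foldl (fun oz a =>
      let c := PySem.List.pyGetD a.toList pos ' '
      if c = '1' then (oz.1 ++ [a], oz.2)
      else if c = '0' then (oz.1, oz.2 ++ [a])
      else oz)
    ([], [])
  if 2 * p.1.length ≥ all.length then p.1 else p.2

-- ===== PRECONDITION & SPEC =====
-- Pre_ excludes exactly the IndexError inputs: pos must be a valid Python index into every
-- string of all (the a[pos] reads) and into cur (the cur[pos] assignment).
def Pre_oxy (all : List String) (pos : Int) (cur : List String) : Prop :=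
  (∀ a ∈ all, PySem.Raise.InRange a.toList.length pos) ∧ PySem.Raise.InRange cur.length pos
instance (all : List String) (pos : Int) (cur : List String) : Decidable (Pre_oxy all pos cur) := by
  unfold Pre_oxy; infer_instance
def pvWitness_oxy : List String × Int × List String := (["10", "01", "11"], 0, ["00"])

def Spec_oxy (all : List String) (pos : Int) (cur : List String) (out : List String) : Prop := out = oxy_alt all pos cur
instance (all : List String) (pos : Int) (cur : List String) (out : List String) : Decidable (Spec_oxy all pos cur out) := by unfold Spec_oxy; infer_instance

-- ===== CLAIM (what is proved, stated in full; the proofs are below) =====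
def Claim_equal_oxy : Prop := ∀ (all : List String) (pos : Int) (cur : List String), Dom_oxy all pos cur → Pre_oxy all pos cur → Spec_oxy all pos cur (oxy all pos cur)

-- ===== LEMMAS AND PROOFS =====

-- reading back the element just written, at the same (possibly negative) in-range index
theorem pyGetD_pySetD_self {α : Type} (xs : List α) (i : Int) (v d : α)
    (h : PySem.Raise.InRange xs.length i) :
    PySem.List.pyGetD (PySem.List.pySetD xs i v) i d = v := by
  obtain ⟨h1, h2⟩ := h
  obtain ⟨k, hk, hklt⟩ : ∃ k, PySem.List.pyIdx? xs.length i = some k ∧ k < xs.length := by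
    unfold PySem.List.pyIdx?
    by_cases h3 : 0 ≤ i
    · exact ⟨i.toNat, by rw [if_pos h3, if_pos h2], by omega⟩
    · exact ⟨xs.length - (-i).toNat, by rw [if_neg h3, if_pos h1], by omega⟩
  unfold PySem.List.pyGetD PySem.List.pyGet? PySem.List.pySetD PySem.List.pySet?
  rw [hk]
  simp only [Option.map_some, Option.getD_some, List.length_set]
  rw [hk, Option.bind_some, List.getElem?_set_self hklt]
  simp

-- A's counting loop, characterised by the '1'-filter
theorem oxy_count (pos : Int) :
    ∀ (all : List String) (o z : Int),
      all.foldl (fun oz a =>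
        if PySem.List.pyGetD a.toList pos ' ' = '1' then (oz.1 + 1, oz.2) else (oz.1, oz.2 + 1))
        (o, z)
      = (o + (all.filter (fun a => PySem.List.pyGetD a.toList pos ' ' = '1')).length,
         z + (all.filter (fun a => ¬ PySem.List.pyGetD a.toList pos ' ' = '1')).length) := by
  intro all
  induction all with
  | nil => simp
  | cons a t ih =>
      intro o z
      simp only [List.foldl_cons, List.filter_cons]
      by_cases h : PySem.List.pyGetD a.toList pos ' ' = '1' <;>
        simp [h, ih] <;> ring

-- B's partitioning loop, characterised by the two filters
theorem oxy_part (pos : Int) :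
    ∀ (all : List String) (l r : List String),
      all.foldl (fun oz a =>
        let c := PySem.List.pyGetD a.toList pos ' '
        if c = '1' then (oz.1 ++ [a], oz.2)
        else if c = '0' then (oz.1, oz.2 ++ [a])
        else oz) (l, r)
      = (l ++ all.filter (fun a => PySem.List.pyGetD a.toList pos ' ' = '1'),
         r ++ all.filter (fun a => PySem.List.pyGetD a.toList pos ' ' = '0')) := by
  intro all
  induction all with
  | nil => simp
  | cons a t ih =>
      intro l r
      simp only [List.foldl_cons, List.filter_cons]
      by_cases h1 : PySem.List.pyGetD a.toList pos ' ' = '1'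
      · simp [h1, ih]
      · by_cases h0 : PySem.List.pyGetD a.toList pos ' ' = '0' <;> simp [h1, h0, ih]

theorem filter_not_length (p : String → Prop) [DecidablePred p] (l : List String) :
    (l.filter (fun a => p a)).length + (l.filter (fun a => ¬ p a)).length = l.length := by
  induction l with
  | nil => simp
  | cons a t ih =>
      simp only [List.filter_cons, decide_not] at *
      by_cases h : p a <;> simp [h] <;> omega

theorem ofList_singleton_eq_iff (c d : Char) : String.ofList [c] = String.ofList [d] ↔ c = d := by
  constructor
  · intro h
    have := congrArg String.toList h
    simpa using this
  · intro h; rw [h]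

-- ===== VERDICT (by name: the statement is the Claim_ definition above) =====
theorem oxy_spec : Claim_equal_oxy := by
  intro all pos cur _ hpre
  obtain ⟨_, hcur⟩ := hpre
  unfold Spec_oxy oxy oxy_alt
  simp only [oxy_count, oxy_part, List.nil_append]
  set ones := all.filter (fun a => decide (PySem.List.pyGetD a.toList pos ' ' = '1')) with hones
  set zeros := all.filter (fun a => decide (PySem.List.pyGetD a.toList pos ' ' = '0')) with hzeros
  set nons := all.filter (fun a => decide (¬ PySem.List.pyGetD a.toList pos ' ' = '1')) with hnons
  have hlen : ones.length + nons.length = all.length :=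
    filter_not_length (fun a => PySem.List.pyGetD a.toList pos ' ' = '1') all
  have hcond : ((0 : Int) + ones.length ≥ 0 + nons.length) ↔ 2 * ones.length ≥ all.length := by
    constructor <;> intro h
    · omega
    · have : (2 * ones.length : Int) ≥ (all.length : Int) := by exact_mod_cast h
      omega
  by_cases hc : ((0 : Int) + ones.length ≥ 0 + nons.length)
  · rw [if_pos hc, if_pos (hcond.mp hc), pyGetD_pySetD_self cur pos "1" "" hcur]
    rw [show ("1" : String) = String.ofList ['1'] from rfl]
    rw [PySem.List.foldl_append_ite_eq_filter
      (fun a : String => String.ofList [PySem.List.pyGetD a.toList pos ' '] = String.ofList ['1']) all [],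
      List.nil_append, hones]
    apply List.filter_congr
    intro a _
    exact decide_eq_decide.mpr (ofList_singleton_eq_iff _ '1')
  · rw [if_neg hc, if_neg (fun h => hc (hcond.mpr h)), pyGetD_pySetD_self cur pos "0" "" hcur]
    rw [show ("0" : String) = String.ofList ['0'] from rfl]
    rw [PySem.List.foldl_append_ite_eq_filter
      (fun a : String => String.ofList [PySem.List.pyGetD a.toList pos ' '] = String.ofList ['0']) all [],
      List.nil_append, hzeros]
    apply List.filter_congr
    intro a _
    exact decide_eq_decide.mpr (ofList_singleton_eq_iff _ '0')
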